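-- pv_equiv track=rewrite | github.com/cselig/cselig.github.io | sketches/code/cryptograms.py | ciphers_conflict
-- ===== SOURCE A (Python) =====
-- def validate_cipher(cipher: 'Dict[str, str]') -> bool:
--     return len(cipher.values()) == len(set(cipher.values()))
--
-- def invert_cipher(cipher: 'Dict[str, str]') -> 'Dict[str, str]':
--     return {v: k for k, v in cipher.items()}
--
-- def ciphers_conflict(cipher1: 'Dict[str, str]', cipher2: 'Dict[str, str]') -> bool:
--     assert(validate_cipher(cipher1) and validate_cipher(cipher2))
--     cipher1_inverse = invert_cipher(cipher1)
--     for k, v in cipher2.items():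
--         if (k in cipher1 and v != cipher1[k] or
--             v in cipher1_inverse and k != cipher1_inverse[v]):
--             return True
--     return False
-- ===== SOURCE B (Python) =====
-- def ciphers_conflict(cipher1: 'Dict[str, str]', cipher2: 'Dict[str, str]') -> bool:
--     assert (len(cipher1.values()) == len(set(cipher1.values())) and
--             len(cipher2.values()) == len(set(cipher2.values())))
--     return any(k1 == k2 and v1 != v2 or v1 == v2 and k1 != k2
--                for k1, v1 in cipher1.items()
--                for k2, v2 in cipher2.items())
-- ===== Notes on version B (the rewrite author's own statement) =====
-- stated objective: simpler
-- what changed: B drops the inverted dict and the per-item dict lookups entirely and instead declares a conflict iff some pair of entries across the two ciphers shares a key with different values or a value with different keys, via a single any() over the cross product.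
import Mathlib
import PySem

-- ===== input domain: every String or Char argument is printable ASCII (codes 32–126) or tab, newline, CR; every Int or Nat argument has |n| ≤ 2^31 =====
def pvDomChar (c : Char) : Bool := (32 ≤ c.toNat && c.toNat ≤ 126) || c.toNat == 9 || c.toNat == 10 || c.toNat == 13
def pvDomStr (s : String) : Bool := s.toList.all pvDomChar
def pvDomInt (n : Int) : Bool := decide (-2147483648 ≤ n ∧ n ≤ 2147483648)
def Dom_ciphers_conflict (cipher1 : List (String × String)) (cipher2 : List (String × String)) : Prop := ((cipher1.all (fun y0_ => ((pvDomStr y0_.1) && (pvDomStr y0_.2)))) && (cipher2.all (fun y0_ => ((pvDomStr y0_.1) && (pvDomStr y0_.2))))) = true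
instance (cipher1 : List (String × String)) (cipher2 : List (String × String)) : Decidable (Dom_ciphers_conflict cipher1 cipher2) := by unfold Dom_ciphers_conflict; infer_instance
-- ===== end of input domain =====

-- B replaces A's inverted-dict scan by a single pairwise cross-product scan (simpler; no dicts built).
-- ===== PORT A =====
-- A's assert(validate_cipher(...)) raises AssertionError when some cipher's values repeat; those inputs are excluded by Pre_.
def pvInvertA (cipher : List (String × String)) : PySem.Dict String String :=
  cipher.foldl (fun d p => d.insert p.2 p.1) PySem.Dict.empty

def ciphers_conflict (cipher1 : List (String × String)) (cipher2 : List (String × String)) : Bool :=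
  let d1 : PySem.Dict String String := PySem.Dict.mk cipher1
  let inv : PySem.Dict String String := pvInvertA cipher1
  cipher2.any (fun q =>
    (d1.contains q.1 && q.2 != d1.getD q.1 "") ||
    (inv.contains q.2 && q.1 != inv.getD q.2 ""))

-- ===== PORT B =====
def ciphers_conflict_alt (cipher1 : List (String × String)) (cipher2 : List (String × String)) : Bool :=
  cipher1.any (fun p => cipher2.any (fun q =>
    (p.1 == q.1 && p.2 != q.2) || (p.2 == q.2 && p.1 != q.1)))

-- ===== PRECONDITION & SPEC =====
-- Pre_ excludes inputs on which A's assert raises (repeated values in a cipher) and association lists with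
-- duplicate keys, which represent no Python dict (Python collapses duplicate keys, making the pairing accidental).
def Pre_ciphers_conflict (cipher1 : List (String × String)) (cipher2 : List (String × String)) : Prop :=
  (cipher1.map Prod.fst).Nodup ∧ (cipher2.map Prod.fst).Nodup ∧
  (cipher1.map Prod.snd).Nodup ∧ (cipher2.map Prod.snd).Nodup

instance (cipher1 : List (String × String)) (cipher2 : List (String × String)) : Decidable (Pre_ciphers_conflict cipher1 cipher2) := by unfold Pre_ciphers_conflict; infer_instance

def pvWitness_ciphers_conflict : (List (String × String)) × (List (String × String)) :=
  ([("a", "b"), ("c", "d")], [("a", "d")])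

def Spec_ciphers_conflict (cipher1 : List (String × String)) (cipher2 : List (String × String)) (out : Bool) : Prop := out = ciphers_conflict_alt cipher1 cipher2
instance (cipher1 : List (String × String)) (cipher2 : List (String × String)) (out : Bool) : Decidable (Spec_ciphers_conflict cipher1 cipher2 out) := by unfold Spec_ciphers_conflict; infer_instance

-- ===== CLAIM (what is proved, stated in full; the proofs are below) =====
def Claim_equal_ciphers_conflict : Prop := ∀ (cipher1 : List (String × String)) (cipher2 : List (String × String)), Dom_ciphers_conflict cipher1 cipher2 → Pre_ciphers_conflict cipher1 cipher2 → Spec_ciphers_conflict cipher1 cipher2 (ciphers_conflict cipher1 cipher2)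

-- ===== LEMMAS AND PROOFS =====


theorem pv_contains_getD_iff {d : PySem.Dict String String} (hnd : d.keys.Nodup) (k v : String) :
    (d.contains k = true ∧ v ≠ d.getD k "") ↔ ∃ p ∈ d.items, p.1 = k ∧ p.2 ≠ v := by
  constructor
  · rintro ⟨hc, hv⟩
    have hk := (PySem.Dict.contains_iff_mem_keys d k).mp hc
    simp only [PySem.Dict.keys, List.mem_map] at hk
    obtain ⟨p, hp, hpk⟩ := hk
    refine ⟨p, hp, hpk, ?_⟩
    have hg := PySem.Dict.getD_of_mem_items (d := d) (k := k) (v := p.2) (d0 := "")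
      (by rw [← hpk]; simpa using hp) hnd
    intro h; exact hv (by rw [hg, h])
  · rintro ⟨p, hp, hpk, hpv⟩
    have hg := PySem.Dict.getD_of_mem_items (d := d) (k := k) (v := p.2) (d0 := "")
      (by rw [← hpk]; simpa using hp) hnd
    constructor
    · exact (PySem.Dict.contains_iff_mem_keys d k).mpr (by
        simp only [PySem.Dict.keys, List.mem_map]; exact ⟨p, hp, hpk⟩)
    · rw [hg]; exact fun h => hpv h.symm

theorem pv_invert_items (cipher : List (String × String))
    (hv : (cipher.map Prod.snd).Nodup) :
    (pvInvertA cipher).items = cipher.map (fun p => (p.2, p.1)) := by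
  unfold pvInvertA
  have := PySem.Dict.items_foldl_insert_fresh (l := cipher) (d := PySem.Dict.empty)
    (k := fun p => p.2) (v := fun p => p.1)
    (by intro a _; simp [PySem.Dict.contains_empty]) (by simpa using hv)
  simpa [PySem.Dict.items, PySem.Dict.empty] using this

theorem pv_cond_iff (cipher1 : List (String × String))
    (hk : (cipher1.map Prod.fst).Nodup) (hv : (cipher1.map Prod.snd).Nodup) (k v : String) :
    (((PySem.Dict.mk cipher1).contains k && v != (PySem.Dict.mk cipher1).getD k "") ||
     ((pvInvertA cipher1).contains v && k != (pvInvertA cipher1).getD v "")) = true ↔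
    ∃ p ∈ cipher1, (p.1 = k ∧ p.2 ≠ v) ∨ (p.2 = v ∧ p.1 ≠ k) := by
  have h1 : (PySem.Dict.mk cipher1).keys.Nodup := by simpa [PySem.Dict.keys] using hk
  have hitems : (pvInvertA cipher1).items = cipher1.map (fun p => (p.2, p.1)) :=
    pv_invert_items cipher1 hv
  have h2 : (pvInvertA cipher1).keys.Nodup := by
    simp [PySem.Dict.keys, hitems]
    simpa [Function.comp] using hv
  rw [Bool.or_eq_true, Bool.and_eq_true, Bool.and_eq_true, bne_iff_ne, bne_iff_ne]
  rw [pv_contains_getD_iff h1 k v, pv_contains_getD_iff h2 v k]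
  constructor
  · rintro (⟨p, hp, h⟩ | ⟨p, hp, h⟩)
    · exact ⟨p, by simpa [PySem.Dict.items] using hp, Or.inl h⟩
    · rw [hitems] at hp
      simp only [List.mem_map] at hp
      obtain ⟨q, hq, rfl⟩ := hp
      exact ⟨q, hq, Or.inr h⟩
  · rintro ⟨p, hp, (h | h)⟩
    · exact Or.inl ⟨p, by simpa [PySem.Dict.items] using hp, h⟩
    · refine Or.inr ⟨(p.2, p.1), ?_, h⟩
      rw [hitems]; exact List.mem_map_of_mem hp

-- ===== VERDICT (by name: the statement is the Claim_ definition above) =====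
theorem ciphers_conflict_spec : Claim_equal_ciphers_conflict := by
  intro cipher1 cipher2 _ hpre
  obtain ⟨hk1, hk2, hv1, hv2⟩ := hpre
  unfold Spec_ciphers_conflict ciphers_conflict ciphers_conflict_alt
  rw [Bool.eq_iff_iff]
  simp only [List.any_eq_true, Bool.or_eq_true, Bool.and_eq_true, beq_iff_eq, bne_iff_ne]
  constructor
  · rintro ⟨q, hq, hc⟩
    obtain ⟨p, hp, h⟩ := (pv_cond_iff cipher1 hk1 hv1 q.1 q.2).mp (by
      simpa only [Bool.or_eq_true, Bool.and_eq_true, bne_iff_ne] using hc)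
    exact ⟨p, hp, q, hq, h⟩
  · rintro ⟨p, hp, q, hq, h⟩
    refine ⟨q, hq, ?_⟩
    simpa only [Bool.or_eq_true, Bool.and_eq_true, bne_iff_ne] using
      (pv_cond_iff cipher1 hk1 hv1 q.1 q.2).mpr ⟨p, hp, h⟩
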